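-- pv_equiv track=rewrite | github.com/RitamDey/Everything | Competive Programming/Python/HackerRank/drawing-book.py | make_book
-- ===== SOURCE A (Python) =====
-- def make_book(num_pages):
--     pages = [(1,),]
--     count = 1
--
--     while count < num_pages:
--         if count+2 <= num_pages:
--             pages.append((count+1, count+2))
--             count += 2
--         elif count+1 <= num_pages:
--             pages.append((count+1,))
--             count += 1
--     return pages
-- ===== SOURCE B (Python) =====
-- def make_book(num_pages):
--     pages = [(1,)]
--     nums = list(range(2, num_pages + 1))
--     for i in range(0, len(nums), 2):
--         pages.append(tuple(nums[i:i+2]))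
--     return pages
-- ===== Notes on version B (the rewrite author's own statement) =====
-- stated objective: simpler
-- what changed: Replaces the counter-driven while loop with two guarded branches by materializing the page numbers 2..n and structurally chunking that list into pairs (trailing singleton falls out of the short final chunk).
import Mathlib
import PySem

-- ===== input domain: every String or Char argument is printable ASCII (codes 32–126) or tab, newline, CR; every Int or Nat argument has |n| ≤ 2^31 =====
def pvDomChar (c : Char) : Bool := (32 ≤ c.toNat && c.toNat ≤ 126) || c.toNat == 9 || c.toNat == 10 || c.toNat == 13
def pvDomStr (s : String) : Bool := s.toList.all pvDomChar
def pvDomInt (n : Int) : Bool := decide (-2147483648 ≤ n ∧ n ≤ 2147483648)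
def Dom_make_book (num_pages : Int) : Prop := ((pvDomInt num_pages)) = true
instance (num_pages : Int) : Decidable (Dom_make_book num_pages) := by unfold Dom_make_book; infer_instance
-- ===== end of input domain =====

-- B replaces the counter-driven while loop by structural pair-chunking of the
-- materialized page-number list 2..n (objective: simpler decomposition).

-- ===== PORT A =====
def make_book_loop (n : Int) : Nat → Int → List (List Int) → List (List Int)
  | 0, _, pages => pages
  | Nat.succ fuel, count, pages =>
    if count < n then
      if count + 2 ≤ n then
        make_book_loop n fuel (count + 2) (pages ++ [[count + 1, count + 2]])
      else if count + 1 ≤ n then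
        make_book_loop n fuel (count + 1) (pages ++ [[count + 1]])
      else pages
    else pages

-- fuel (num_pages - 1).toNat bounds the loop's iterations (count rises by ≥ 1 per step)
def make_book (num_pages : Int) : List (List Int) :=
  make_book_loop num_pages (num_pages - 1).toNat 1 [[1]]

-- ===== PORT B =====
def make_book_alt (num_pages : Int) : List (List Int) :=
  let nums := PySem.List.pyRange 2 (num_pages + 1) 1
  (PySem.List.pyRange 0 (nums.length : Int) 2).foldl
    (fun pages i => pages ++ [PySem.List.slice nums (some i) (some (i + 2))]) [[1]]

-- ===== PRECONDITION & SPEC =====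
def Spec_make_book (num_pages : Int) (out : List (List Int)) : Prop := out = make_book_alt num_pages
instance (num_pages : Int) (out : List (List Int)) : Decidable (Spec_make_book num_pages out) := by unfold Spec_make_book; infer_instance

-- ===== CLAIM (what is proved, stated in full; the proofs are below) =====
def Claim_equal_make_book : Prop := ∀ (num_pages : Int), Dom_make_book num_pages → Spec_make_book num_pages (make_book num_pages)

-- ===== LEMMAS AND PROOFS =====

def chunk : List Int → List (List Int)
  | [] => []
  | [x] => [[x]]
  | x :: y :: rest => [x, y] :: chunk rest

theorem pyRange_two_cons (a b : Int) (h : a < b) :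
    PySem.List.pyRange a b 2 = a :: PySem.List.pyRange (a + 2) b 2 := by
  rw [PySem.List.pyRange_of_pos _ _ (by norm_num : (0:Int) < 2),
    PySem.List.pyRange_of_pos _ _ (by norm_num : (0:Int) < 2), if_pos h]
  have hm : ((b - a + 2 - 1) / 2).toNat
      = (if a + 2 < b then ((b - (a + 2) + 2 - 1) / 2).toNat else 0) + 1 := by
    split_ifs <;> omega
  rw [hm, List.range_succ_eq_map]
  simp only [List.map_cons, List.map_map, Nat.cast_zero, mul_zero, add_zero]
  congr 1
  refine List.map_congr_left fun k _ => ?_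
  simp only [Function.comp_apply, Nat.cast_succ]
  ring

theorem pyRange_two_nil (a b : Int) (h : b ≤ a) : PySem.List.pyRange a b 2 = [] := by
  rw [PySem.List.pyRange_of_pos _ _ (by norm_num : (0:Int) < 2), if_neg (by omega)]
  simp

theorem chunk_take_drop (l : List Int) (h : l ≠ []) :
    chunk l = l.take 2 :: chunk (l.drop 2) := by
  match l with
  | [] => exact absurd rfl h
  | [x] => simp [chunk]
  | x :: y :: rest => simp [chunk]

theorem alt_foldl_eq_chunk (nums : List Int) : ∀ (fuel k : Nat) (pages : List (List Int)),
    nums.length ≤ k + 2 * fuel →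
    (PySem.List.pyRange (k : Int) (nums.length : Int) 2).foldl
      (fun pages i => pages ++ [PySem.List.slice nums (some i) (some (i + 2))]) pages
    = pages ++ chunk (nums.drop k) := by
  intro fuel
  induction fuel with
  | zero =>
      intro k pages hf
      rw [pyRange_two_nil _ _ (by exact_mod_cast by omega)]
      rw [List.drop_of_length_le (by omega)]
      simp [chunk]
  | succ fuel ih =>
      intro k pages hf
      by_cases hk : k < nums.length
      · rw [pyRange_two_cons _ _ (by exact_mod_cast hk), List.foldl_cons]
        have hcast : (k : Int) + 2 = ((k + 2 : Nat) : Int) := by push_cast; ring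
        rw [hcast, PySem.List.slice_natCast, ih (k + 2) _ (by omega),
          chunk_take_drop (nums.drop k) (by simp; omega)]
        have h2 : k + 2 - k = 2 := by omega
        rw [h2, List.drop_drop]
        simp
      · rw [pyRange_two_nil _ _ (by exact_mod_cast by omega),
          List.drop_of_length_le (by omega)]
        simp [chunk]

theorem make_book_loop_eq (n : Int) : ∀ (fuel : Nat) (count : Int) (pages : List (List Int)),
    (n - count).toNat ≤ fuel →
    make_book_loop n fuel count pages = pages ++ chunk (PySem.List.pyRange (count + 1) (n + 1) 1) := by
  intro fuel
  induction fuel with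
  | zero =>
      intro count pages hfuel
      rw [make_book_loop, PySem.List.pyRange_one_eq_nil (by omega : n + 1 ≤ count + 1)]
      simp [chunk]
  | succ fuel ih =>
      intro count pages hfuel
      rw [make_book_loop]
      by_cases h1 : count < n
      · by_cases h2 : count + 2 ≤ n
        · rw [if_pos h1, if_pos h2,
            ih (count + 2) _ (by omega),
            PySem.List.pyRange_one_cons (by omega : count + 1 < n + 1),
            PySem.List.pyRange_one_cons (by omega : count + 1 + 1 < n + 1),
            (by ring : count + 1 + 1 = count + 2)]
          simp [chunk]
        · have h3 : count + 1 ≤ n := by omega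
          rw [if_pos h1, if_neg h2, if_pos h3,
            ih (count + 1) _ (by omega),
            PySem.List.pyRange_one_eq_nil (by omega : n + 1 ≤ count + 1 + 1),
            PySem.List.pyRange_one_cons (by omega : count + 1 < n + 1),
            PySem.List.pyRange_one_eq_nil (by omega : n + 1 ≤ count + 1 + 1)]
          simp [chunk]
      · rw [if_neg h1, PySem.List.pyRange_one_eq_nil (by omega : n + 1 ≤ count + 1)]
        simp [chunk]

-- ===== VERDICT (by name: the statement is the Claim_ definition above) =====
theorem make_book_spec : Claim_equal_make_book := by
  intro n _
  unfold Spec_make_book make_book make_book_alt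
  rw [make_book_loop_eq n (n - 1).toNat 1 [[1]] (by omega)]
  have := alt_foldl_eq_chunk (PySem.List.pyRange 2 (n + 1) 1)
    (PySem.List.pyRange 2 (n + 1) 1).length 0 [[1]] (by omega)
  simp only [Nat.cast_zero] at this
  rw [this]
  simp
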